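-- pv_equiv track=rewrite | github.com/MindDevastation/factory-vm | services/analytics_center/page_aggregations.py | _overall_freshness
-- ===== SOURCE A (Python) =====
-- from typing import Any
--
-- def _overall_freshness(source_states: dict[str, str]) -> dict[str, Any]:
--     states = list(source_states.values())
--     if states and all(state == "MISSING" for state in states):
--         return {"status": "MISSING", "warning": "no canonical analytics source data"}
--     if "STALE" in states:
--         stale_sources = sorted([k for k, v in source_states.items() if v == "STALE"])
--         return {"status": "STALE", "warning": f"stale upstream sources: {', '.join(stale_sources)}"}
--     if "PARTIAL" in states or "MISSING" in states:
--         degraded_sources = sorted([k for k, v in source_states.items() if v in {"PARTIAL", "MISSING"}])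
--         return {"status": "PARTIAL", "warning": f"degraded upstream sources: {', '.join(degraded_sources)}"}
--     return {"status": "FRESH", "warning": None}
-- ===== SOURCE B (Python) =====
-- def _overall_freshness(source_states: dict[str, str]) -> dict:
--     groups: dict[str, list[str]] = {}
--     for k, v in source_states.items():
--         groups.setdefault(v, []).append(k)
--     if groups and set(groups) == {"MISSING"}:
--         return {"status": "MISSING", "warning": "no canonical analytics source data"}
--     if "STALE" in groups:
--         return {"status": "STALE", "warning": "stale upstream sources: " + ", ".join(sorted(groups["STALE"]))}
--     if "PARTIAL" in groups or "MISSING" in groups: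
--         return {"status": "PARTIAL", "warning": "degraded upstream sources: " + ", ".join(sorted(groups.get("PARTIAL", []) + groups.get("MISSING", [])))}
--     return {"status": "FRESH", "warning": None}
-- ===== Notes on version B (the rewrite author's own statement) =====
-- stated objective: alternative
-- what changed: Instead of re-scanning the items with a fresh filter in every branch, B makes one grouping pass building a dict state->list of source keys and each branch just looks up (and sorts) the prebuilt groups; the PARTIAL branch sorts the concatenation of the PARTIAL and MISSING groups.
import Mathlib
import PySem

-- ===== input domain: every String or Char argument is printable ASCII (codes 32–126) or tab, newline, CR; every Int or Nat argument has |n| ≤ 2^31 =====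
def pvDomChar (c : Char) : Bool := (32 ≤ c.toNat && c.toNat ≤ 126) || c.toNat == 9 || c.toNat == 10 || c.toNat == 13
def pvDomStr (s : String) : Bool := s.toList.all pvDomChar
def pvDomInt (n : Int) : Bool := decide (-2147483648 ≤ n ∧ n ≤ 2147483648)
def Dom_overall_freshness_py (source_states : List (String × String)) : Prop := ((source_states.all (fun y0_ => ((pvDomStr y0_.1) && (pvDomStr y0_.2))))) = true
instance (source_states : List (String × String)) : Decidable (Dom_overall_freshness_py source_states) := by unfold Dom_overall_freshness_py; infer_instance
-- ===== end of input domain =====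

-- B replaces A's per-branch filtering scans by one grouping pass (dict state -> list of source keys) consumed by the branches; alternative structure, same cost.
-- The Python parameter is a dict; both ports decode the association-list encoding with PySem.Dict.ofList (last value wins, first position kept, as dict() does).


-- ===== PORT A =====
def overall_freshness_py (source_states : List (String × String)) : List (String × Option String) :=
  let d := PySem.Dict.ofList source_states
  let states := d.values
  if !states.isEmpty && states.all (fun state => state == "MISSING") then
    [("status", some "MISSING"), ("warning", some "no canonical analytics source data")]
  else if states.contains "STALE" then
    let stale_sources := PySem.List.sorted ((d.items.filter (fun p => p.2 == "STALE")).map (fun p => p.1)) (fun x => x) false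
    [("status", some "STALE"), ("warning", some ("stale upstream sources: " ++ PySem.Str.join ", " stale_sources))]
  else if states.contains "PARTIAL" || states.contains "MISSING" then
    let degraded_sources := PySem.List.sorted ((d.items.filter (fun p => p.2 == "PARTIAL" || p.2 == "MISSING")).map (fun p => p.1)) (fun x => x) false
    [("status", some "PARTIAL"), ("warning", some ("degraded upstream sources: " ++ PySem.Str.join ", " degraded_sources))]
  else
    [("status", some "FRESH"), ("warning", none)]

-- ===== PORT B =====
def overall_freshness_py_alt (source_states : List (String × String)) : List (String × Option String) :=
  let d := PySem.Dict.ofList source_states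
  -- groups.setdefault(v, []).append(k)  ==  groups[v] = groups.get(v, []) + [k]  ==  Dict.modify
  let groups : PySem.Dict String (List String) :=
    d.items.foldl (fun g p => g.modify p.2 [] (fun ks => ks ++ [p.1])) PySem.Dict.empty
  if !groups.items.isEmpty && PySem.Set.equal groups.keys ["MISSING"] then
    [("status", some "MISSING"), ("warning", some "no canonical analytics source data")]
  else if groups.contains "STALE" then
    -- groups["STALE"] is guarded by the containment test, so getD is exact here
    [("status", some "STALE"), ("warning", some ("stale upstream sources: " ++ PySem.Str.join ", " (PySem.List.sorted (groups.getD "STALE" []) (fun x => x) false)))]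
  else if groups.contains "PARTIAL" || groups.contains "MISSING" then
    [("status", some "PARTIAL"), ("warning", some ("degraded upstream sources: " ++ PySem.Str.join ", " (PySem.List.sorted (groups.getD "PARTIAL" [] ++ groups.getD "MISSING" []) (fun x => x) false)))]
  else
    [("status", some "FRESH"), ("warning", none)]

-- ===== PRECONDITION & SPEC =====
def Spec_overall_freshness_py (source_states : List (String × String)) (out : List (String × Option String)) : Prop := out = overall_freshness_py_alt source_states
instance (source_states : List (String × String)) (out : List (String × Option String)) : Decidable (Spec_overall_freshness_py source_states out) := by unfold Spec_overall_freshness_py; infer_instance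

-- ===== CLAIM (what is proved, stated in full; the proofs are below) =====
def Claim_equal_overall_freshness_py : Prop := ∀ (source_states : List (String × String)), Dom_overall_freshness_py source_states → Spec_overall_freshness_py source_states (overall_freshness_py source_states)

-- ===== LEMMAS AND PROOFS =====

/-- The grouping fold of B, over an arbitrary items list. -/
def pvGroups (l : List (String × String)) : PySem.Dict String (List String) :=
  l.foldl (fun g p => g.modify p.2 [] (fun ks => ks ++ [p.1])) PySem.Dict.empty

theorem pvGroups_keys (l : List (String × String)) :
    (pvGroups l).keys = PySem.Set.ofList (l.map (fun p => p.2)) := by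
  unfold pvGroups
  rw [PySem.Dict.keys_foldl_modify_key (key := fun p : String × String => p.2)
        (f := fun (g : PySem.Dict String (List String)) p => fun ks => ks ++ [p.1]) (d0 := [])]
  simp [PySem.Set.ofList_eq_foldl, PySem.Set.update, PySem.Dict.keys_empty]

theorem pvGroups_getD (l : List (String × String)) (v : String) :
    (pvGroups l).getD v [] = (l.filter (fun p => p.2 == v)).map (fun p => p.1) := by
  unfold pvGroups
  have : l.foldl (fun g p => g.modify p.2 [] (fun ks => ks ++ [p.1])) PySem.Dict.empty
       = (l.map Prod.swap).foldl (fun (g : PySem.Dict String (List String)) p => g.modify p.1 [] (fun ks => ks ++ [p.2])) PySem.Dict.empty := by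
    rw [List.foldl_map]
    simp only [Prod.fst_swap, Prod.snd_swap]
  rw [this, PySem.Dict.getD_foldl_modify_append]
  simp [List.filter_map, List.map_map]
  rfl

theorem pvFilter_or_perm (l : List (String × String)) :
    (l.filter (fun p => p.2 == "PARTIAL" || p.2 == "MISSING")).Perm
      (l.filter (fun p => p.2 == "PARTIAL") ++ l.filter (fun p => p.2 == "MISSING")) := by
  induction l with
  | nil => simp
  | cons a t ih =>
    by_cases hp : a.2 = "PARTIAL"
    · simp [hp]; exact ih
    · by_cases hm : a.2 = "MISSING"
      · simp [hm]
        exact (ih.cons a).trans List.perm_middle.symm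
      · simp [hp, hm]; exact ih

theorem pvMain (l : List (String × String)) :
    (let states := l.map (fun p => p.2)
     if !states.isEmpty && states.all (fun state => state == "MISSING") then
       [("status", some "MISSING"), ("warning", some "no canonical analytics source data")]
     else if states.contains "STALE" then
       [("status", some "STALE"), ("warning", some ("stale upstream sources: " ++ PySem.Str.join ", " (PySem.List.sorted ((l.filter (fun p => p.2 == "STALE")).map (fun p => p.1)) (fun x => x) false)))]
     else if states.contains "PARTIAL" || states.contains "MISSING" then
       [("status", some "PARTIAL"), ("warning", some ("degraded upstream sources: " ++ PySem.Str.join ", " (PySem.List.sorted ((l.filter (fun p => p.2 == "PARTIAL" || p.2 == "MISSING")).map (fun p => p.1)) (fun x => x) false)))]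
     else
       [("status", some "FRESH"), ("warning", (none : Option String))])
    =
    (let groups := pvGroups l
     if !groups.items.isEmpty && PySem.Set.equal groups.keys ["MISSING"] then
       [("status", some "MISSING"), ("warning", some "no canonical analytics source data")]
     else if groups.contains "STALE" then
       [("status", some "STALE"), ("warning", some ("stale upstream sources: " ++ PySem.Str.join ", " (PySem.List.sorted (groups.getD "STALE" []) (fun x => x) false)))]
     else if groups.contains "PARTIAL" || groups.contains "MISSING" then
       [("status", some "PARTIAL"), ("warning", some ("degraded upstream sources: " ++ PySem.Str.join ", " (PySem.List.sorted (groups.getD "PARTIAL" [] ++ groups.getD "MISSING" []) (fun x => x) false)))]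
     else
       [("status", some "FRESH"), ("warning", (none : Option String))]) := by
  have hk := pvGroups_keys l
  have hcond : ∀ v : String, (pvGroups l).contains v = (l.map (fun p => p.2)).contains v := by
    intro v
    rw [PySem.Dict.contains_eq_decide_mem_keys, hk, Bool.eq_iff_iff]
    simp [PySem.Set.mem_ofList]
  have hempty : (pvGroups l).items.isEmpty = (l.map (fun p => p.2)).isEmpty := by
    have h1 : (pvGroups l).keys.isEmpty = (pvGroups l).items.isEmpty := by
      simp only [PySem.Dict.keys, List.isEmpty_map]
    rw [← h1, hk, Bool.eq_iff_iff]
    simp only [List.isEmpty_iff]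
    cases hs : l.map (fun p => p.2) with
    | nil => simp [PySem.Set.ofList]
    | cons a t =>
      constructor
      · intro h
        have := (PySem.Set.mem_ofList (a :: t) a).mpr List.mem_cons_self
        rw [h] at this
        cases this
      · intro h; cases h
  have hall : (!(l.map (fun p => p.2)).isEmpty && (l.map (fun p => p.2)).all (fun state => state == "MISSING"))
            = (!(pvGroups l).items.isEmpty && PySem.Set.equal (pvGroups l).keys ["MISSING"]) := by
    rw [hempty, hk]
    cases hs : l.map (fun p => p.2) with
    | nil => simp
    | cons s rest =>
      simp only [List.isEmpty_cons, Bool.not_false, Bool.true_and]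
      rw [Bool.eq_iff_iff, List.all_eq_true, PySem.Set.equal_iff]
      constructor
      · intro h x
        simp only [PySem.Set.mem_ofList, List.mem_singleton]
        constructor
        · intro hx; simpa using h x hx
        · intro hx
          have : s = "MISSING" := by simpa using h s List.mem_cons_self
          rw [hx, ← this]; exact List.mem_cons_self
      · intro h x hx
        have := (h x).mp (by simpa [PySem.Set.mem_ofList] using hx)
        simpa using this
  have hS := pvGroups_getD l "STALE"
  have hPM : PySem.List.sorted ((l.filter (fun p => p.2 == "PARTIAL" || p.2 == "MISSING")).map (fun p => p.1)) (fun x => x) false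
           = PySem.List.sorted ((pvGroups l).getD "PARTIAL" [] ++ (pvGroups l).getD "MISSING" []) (fun x => x) false := by
    rw [pvGroups_getD l "PARTIAL", pvGroups_getD l "MISSING", ← List.map_append,
        PySem.List.sorted_id_eq_sorted_id_iff_perm]
    exact (pvFilter_or_perm l).map (fun p => p.1)
  simp only [hall, hcond, hS, hPM]

-- ===== VERDICT (by name: the statement is the Claim_ definition above) =====
theorem overall_freshness_py_spec : Claim_equal_overall_freshness_py := by
  intro ss _
  unfold Spec_overall_freshness_py overall_freshness_py overall_freshness_py_alt
  have h := pvMain (PySem.Dict.ofList ss).items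
  simpa [pvGroups, PySem.Dict.values] using h
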